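-- pv_equiv track=rewrite | github.com/ishan00/SiteMe | src/interpreter.py | taggedMaker
-- ===== SOURCE A (Python) =====
-- DirectChangeStyles={"bold":"b","h2":"h2","h1":"h1","h3":"h3","h4":"h4","h5":"h5","h6":"h6","italic":"i","underline":"u" ,"center":"center","code":'code', "sup":'sup' , "sub":'sub' , "kbd":'kbd' , 'quote':'blockquote'}
--
-- IndirectChangeStyles={'latex':'lang:"latex"' ,'r':'text-align:right','l':'text-align:left','c':'text-align:center', 'danger':'background-color: #ffdddd;border-left: 6px solid #f44336; margin-bottom:15px;padding:10px 12px',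
-- 'info':'background-color: #e7f3fe;border-left: 6px solid #2196F3;margin-bottom:15px;padding:10px 12px','success':'background-color: #d1ffa0;border-left: 6px solid #4CAF50;margin-bottom:15px;padding:10px 12px' , 'warning':'background-color: #ffffcc;border-left: 6px solid #ffeb3b;margin-bottom:15px;padding:10px 12px'}
--
-- def taggedMaker(style,content):
-- 	if(not style):
-- 		return content
-- 	else:
-- 		style=style.split(',')
-- 		style=[IndirectChangeStyles[x] if x in IndirectChangeStyles else x for x in style]
-- 		ltagged=[]
-- 		htagged=[]
-- 		for x in style:
-- 			if(':' in x):
-- 				htagged.append(x)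
-- 			else:
-- 				ltagged.append(x)
-- 		if(ltagged and htagged):
-- 			htagged=';'.join(htagged)+';'
-- 			ltaggedStart=''.join(['<'+DirectChangeStyles[x]+'>' for x in ltagged])
-- 			ltaggedEnd=''.join(['</'+DirectChangeStyles[x]+'>' for x in ltagged[::-1]])
-- 			if('align' in htagged or 'text-align' in htagged):
-- 				return "<div style=\""+htagged+"\">"+ltaggedStart+content+ltaggedEnd+"</div>\n"
-- 			else:
-- 				return "<span style=\""+htagged+"\">"+ltaggedStart+content+ltaggedEnd+"</span>\n"
-- 		elif(ltagged):
-- 			ltaggedStart=''.join(['<'+str(DirectChangeStyles[x])+'>' for x in ltagged])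
-- 			ltaggedEnd=''.join(['</'+str(DirectChangeStyles[x])+'>' for x in ltagged[::-1]])
-- 			return ltaggedStart+content+ltaggedEnd
-- 		elif(htagged):
-- 			htagged=';'.join(htagged)+';'
-- 			if('align' in htagged or 'text-align' in htagged):
-- 				return "<div style=\""+htagged+"\">"+content+"</div>\n"
-- 			else:
-- 				return "<span style=\""+htagged+"\">"+content+"</span>\n"
-- ===== SOURCE B (Python) =====
-- DirectChangeStyles={"bold":"b","h2":"h2","h1":"h1","h3":"h3","h4":"h4","h5":"h5","h6":"h6","italic":"i","underline":"u" ,"center":"center","code":'code', "sup":'sup' , "sub":'sub' , "kbd":'kbd' , 'quote':'blockquote'}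
--
-- IndirectChangeStyles={'latex':'lang:"latex"' ,'r':'text-align:right','l':'text-align:left','c':'text-align:center', 'danger':'background-color: #ffdddd;border-left: 6px solid #f44336; margin-bottom:15px;padding:10px 12px',
-- 'info':'background-color: #e7f3fe;border-left: 6px solid #2196F3;margin-bottom:15px;padding:10px 12px','success':'background-color: #d1ffa0;border-left: 6px solid #4CAF50;margin-bottom:15px;padding:10px 12px' , 'warning':'background-color: #ffffcc;border-left: 6px solid #ffeb3b;margin-bottom:15px;padding:10px 12px'}
--
-- def taggedMaker(style, content):
--     if not style:
--         return content
--     def go(tokens):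
--         # recursion over the token list: returns (style properties, content
--         # already wrapped in the nested direct tags, outermost first)
--         if not tokens:
--             return [], content
--         t = IndirectChangeStyles.get(tokens[0], tokens[0])
--         props, inner = go(tokens[1:])
--         if ':' in t:
--             return [t] + props, inner
--         tag = DirectChangeStyles[t]
--         return props, '<' + tag + '>' + inner + '</' + tag + '>'
--     props, inner = go(style.split(','))
--     if not props:
--         return inner
--     styl = ';'.join(props) + ';'
--     wrap = 'div' if 'align' in styl else 'span'
--     return '<' + wrap + ' style="' + styl + '">' + inner + '</' + wrap + '>\n'
-- ===== Notes on version B (the rewrite author's own statement) =====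
-- stated objective: alternative
-- what changed: Replaces A's staged pipeline (split, mapped list, fold-partition into two lists, two joined open/close tag strings, four duplicated return branches) with a single recursion over the token list that collects the style properties and nests each direct tag around the content as the recursion unwinds, followed by one conditional div/span wrap (A's 'text-align' test is subsumed by the 'align' one).
import Mathlib
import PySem

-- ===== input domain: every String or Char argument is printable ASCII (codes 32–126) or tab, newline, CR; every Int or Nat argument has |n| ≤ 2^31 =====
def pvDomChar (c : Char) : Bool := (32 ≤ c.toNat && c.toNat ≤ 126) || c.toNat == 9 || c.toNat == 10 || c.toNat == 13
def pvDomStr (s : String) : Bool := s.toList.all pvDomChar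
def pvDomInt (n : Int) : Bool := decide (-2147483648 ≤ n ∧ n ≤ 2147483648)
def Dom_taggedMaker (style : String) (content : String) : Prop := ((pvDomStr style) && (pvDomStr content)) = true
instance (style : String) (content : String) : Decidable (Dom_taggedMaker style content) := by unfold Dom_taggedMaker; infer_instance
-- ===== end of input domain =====

-- B replaces A's staged passes (partition, two joined tag lists, four return branches) with one
-- recursion over the token list that nests the direct tags around the content as it unwinds (simpler decomposition, same cost).

-- module-level constants shared by both Pythons
def DirectChangeStyles : PySem.Dict String String := PySem.Dict.ofList
  [("bold","b"),("h2","h2"),("h1","h1"),("h3","h3"),("h4","h4"),("h5","h5"),("h6","h6"),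
   ("italic","i"),("underline","u"),("center","center"),("code","code"),("sup","sup"),
   ("sub","sub"),("kbd","kbd"),("quote","blockquote")]

def IndirectChangeStyles : PySem.Dict String String := PySem.Dict.ofList
  [("latex","lang:\"latex\""),("r","text-align:right"),("l","text-align:left"),("c","text-align:center"),
   ("danger","background-color: #ffdddd;border-left: 6px solid #f44336; margin-bottom:15px;padding:10px 12px"),
   ("info","background-color: #e7f3fe;border-left: 6px solid #2196F3;margin-bottom:15px;padding:10px 12px"),
   ("success","background-color: #d1ffa0;border-left: 6px solid #4CAF50;margin-bottom:15px;padding:10px 12px"),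
   ("warning","background-color: #ffffcc;border-left: 6px solid #ffeb3b;margin-bottom:15px;padding:10px 12px")]

-- ===== PORT A =====
-- DirectChangeStyles[x] raises KeyError when x is absent (Pre_ excludes that); the port uses "" there.
def taggedMaker (style : String) (content : String) : String :=
  if style = "" then content
  else
    let style1 := (PySem.Str.split? style ",").getD []
    let style2 := style1.map (fun x =>
      if (PySem.Dict.get? IndirectChangeStyles x).isSome
      then (PySem.Dict.get? IndirectChangeStyles x).getD x else x)
    let part := style2.foldl (fun (acc : List String × List String) x =>
      if PySem.Str.isIn ":" x then (acc.1, acc.2 ++ [x]) else (acc.1 ++ [x], acc.2)) ([], [])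
    let ltagged := part.1
    let htagged := part.2
    if ltagged ≠ [] ∧ htagged ≠ [] then
      let h := PySem.Str.join ";" htagged ++ ";"
      let ltaggedStart := PySem.Str.join "" (ltagged.map (fun x => "<" ++ (PySem.Dict.get? DirectChangeStyles x).getD "" ++ ">"))
      -- ltagged[::-1] is List.reverse (PySem.List.slice?_none_none_neg_one)
      let ltaggedEnd := PySem.Str.join "" (ltagged.reverse.map (fun x => "</" ++ (PySem.Dict.get? DirectChangeStyles x).getD "" ++ ">"))
      if PySem.Str.isIn "align" h ∨ PySem.Str.isIn "text-align" h then
        "<div style=\"" ++ h ++ "\">" ++ ltaggedStart ++ content ++ ltaggedEnd ++ "</div>\n"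
      else
        "<span style=\"" ++ h ++ "\">" ++ ltaggedStart ++ content ++ ltaggedEnd ++ "</span>\n"
    else if ltagged ≠ [] then
      let ltaggedStart := PySem.Str.join "" (ltagged.map (fun x => "<" ++ (PySem.Dict.get? DirectChangeStyles x).getD "" ++ ">"))
      let ltaggedEnd := PySem.Str.join "" (ltagged.reverse.map (fun x => "</" ++ (PySem.Dict.get? DirectChangeStyles x).getD "" ++ ">"))
      ltaggedStart ++ content ++ ltaggedEnd
    else if htagged ≠ [] then
      let h := PySem.Str.join ";" htagged ++ ";"
      if PySem.Str.isIn "align" h ∨ PySem.Str.isIn "text-align" h then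
        "<div style=\"" ++ h ++ "\">" ++ content ++ "</div>\n"
      else
        "<span style=\"" ++ h ++ "\">" ++ content ++ "</span>\n"
    else "" -- Python falls off and returns None; unreachable: split always yields ≥ 1 token

-- ===== PORT B =====
-- Source B's inner 'go': recursion over the tokens; DirectChangeStyles[t] raises KeyError when
-- t is absent (outside Pre_); the port uses "" there.
def tmGo (content : String) : List String → List String × String
  | [] => ([], content)
  | t0 :: rest =>
    let t := (PySem.Dict.get? IndirectChangeStyles t0).getD t0
    let pi := tmGo content rest
    if PySem.Str.isIn ":" t then (t :: pi.1, pi.2)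
    else
      let tag := (PySem.Dict.get? DirectChangeStyles t).getD ""
      (pi.1, "<" ++ tag ++ ">" ++ pi.2 ++ "</" ++ tag ++ ">")

def taggedMaker_alt (style : String) (content : String) : String :=
  if style = "" then content
  else
    let pi := tmGo content ((PySem.Str.split? style ",").getD [])
    if pi.1 = [] then pi.2
    else
      let styl := PySem.Str.join ";" pi.1 ++ ";"
      let wrap := if PySem.Str.isIn "align" styl then "div" else "span"
      "<" ++ wrap ++ " style=\"" ++ styl ++ "\">" ++ pi.2 ++ "</" ++ wrap ++ ">\n"

-- ===== PRECONDITION & SPEC =====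
-- Pre_ excludes exactly the inputs where A raises KeyError: a comma-token that, after the
-- IndirectChangeStyles substitution, has no ':' and is not a DirectChangeStyles key (B raises there too).
def Pre_taggedMaker (style : String) (content : String) : Prop :=
  style = "" ∨ ∀ t ∈ (PySem.Str.split? style ",").getD [],
    PySem.Str.isIn ":" ((PySem.Dict.get? IndirectChangeStyles t).getD t) = true ∨
    (PySem.Dict.get? DirectChangeStyles ((PySem.Dict.get? IndirectChangeStyles t).getD t)).isSome = true
instance (style : String) (content : String) : Decidable (Pre_taggedMaker style content) := by
  unfold Pre_taggedMaker; infer_instance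

def pvWitness_taggedMaker : String × String := ("bold,r,danger", "hello")

def Spec_taggedMaker (style : String) (content : String) (out : String) : Prop := out = taggedMaker_alt style content
instance (style : String) (content : String) (out : String) : Decidable (Spec_taggedMaker style content out) := by unfold Spec_taggedMaker; infer_instance

-- ===== CLAIM (what is proved, stated in full; the proofs are below) =====
def Claim_equal_taggedMaker : Prop := ∀ (style : String) (content : String), Dom_taggedMaker style content → Pre_taggedMaker style content → Spec_taggedMaker style content (taggedMaker style content)

-- ===== LEMMAS AND PROOFS =====

-- ''.join over a cons / a snoc
theorem pv_join_empty_cons (a : String) (l : List String) :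
    PySem.Str.join "" (a :: l) = a ++ PySem.Str.join "" l := by
  cases l with
  | nil => simp [PySem.Str.join, PySem.Chars.join, List.intercalate]
  | cons b bs =>
    rw [PySem.Str.join, PySem.Str.join, show ("" : String).toList = [] from rfl]
    simp only [List.map_cons]
    rw [PySem.Chars.join_cons_cons, List.append_nil, String.ofList_append,
      String.ofList_toList]

theorem pv_join_empty_snoc (l : List String) (a : String) :
    PySem.Str.join "" (l ++ [a]) = PySem.Str.join "" l ++ a := by
  induction l with
  | nil =>
    rw [List.nil_append, pv_join_empty_cons]
    simp [PySem.Str.join, PySem.Chars.join, List.intercalate]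
  | cons x xs ih =>
    rw [List.cons_append, pv_join_empty_cons, ih, pv_join_empty_cons, String.append_assoc]

-- B's recursion computes A's (colon tokens, open-tags ++ content ++ reversed close-tags).
theorem pv_tmGo_eq (content : String) (xs : List String) :
    tmGo content xs =
      ((xs.map (fun t => (PySem.Dict.get? IndirectChangeStyles t).getD t)).filter
          (fun t => PySem.Str.isIn ":" t),
       PySem.Str.join "" (((xs.map (fun t => (PySem.Dict.get? IndirectChangeStyles t).getD t)).filter
          (fun t => !(PySem.Str.isIn ":" t))).map
          (fun x => "<" ++ (PySem.Dict.get? DirectChangeStyles x).getD "" ++ ">"))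
       ++ content ++
       PySem.Str.join "" (((xs.map (fun t => (PySem.Dict.get? IndirectChangeStyles t).getD t)).filter
          (fun t => !(PySem.Str.isIn ":" t))).reverse.map
          (fun x => "</" ++ (PySem.Dict.get? DirectChangeStyles x).getD "" ++ ">")) ) := by
  induction xs with
  | nil =>
    simp [tmGo, PySem.Str.join, PySem.Chars.join, List.intercalate]
  | cons t0 rest ih =>
    rw [tmGo, ih]
    simp only [List.map_cons, List.filter_cons]
    by_cases hc : PySem.Str.isIn ":" ((PySem.Dict.get? IndirectChangeStyles t0).getD t0) = true
    · simp only [hc, Bool.not_true, Bool.false_eq_true, if_true, if_false]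
    · simp only [eq_false_of_ne_true hc, Bool.not_false, Bool.false_eq_true, if_true, if_false,
        List.map_cons, List.reverse_cons, List.map_append, List.map_cons, List.map_nil]
      rw [pv_join_empty_cons, pv_join_empty_snoc]
      simp [String.append_assoc]

-- A's fold partitions style2 into (non-colon tokens, colon tokens).
theorem pv_fold_partition (xs : List String) (l0 h0 : List String) :
    xs.foldl (fun (acc : List String × List String) x =>
      if PySem.Str.isIn ":" x then (acc.1, acc.2 ++ [x]) else (acc.1 ++ [x], acc.2)) (l0, h0)
    = (l0 ++ xs.filter (fun t => !(PySem.Str.isIn ":" t)), h0 ++ xs.filter (fun t => PySem.Str.isIn ":" t)) := by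
  induction xs generalizing l0 h0 with
  | nil => simp
  | cons x xs ih =>
    rw [List.foldl_cons]
    by_cases hx : PySem.Str.isIn ":" x = true
    · rw [if_pos hx, ih]
      simp only [List.filter_cons, hx, Bool.not_true, if_true, List.append_assoc,
        List.singleton_append]
      simp
    · rw [if_neg hx, ih]
      simp only [List.filter_cons, eq_false_of_ne_true hx, Bool.not_false, if_true,
        List.append_assoc, List.singleton_append]
      simp

-- 'text-align' in h implies 'align' in h, so A's disjunction collapses to B's single test.
theorem pv_align_collapse (h : String) :
    (PySem.Str.isIn "align" h = true ∨ PySem.Str.isIn "text-align" h = true)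
    ↔ PySem.Str.isIn "align" h = true := by
  constructor
  · rintro (ha | ht)
    · exact ha
    · rw [PySem.Str.isIn_iff_infix] at ht ⊢
      exact List.IsInfix.trans (by decide) ht
  · exact Or.inl

-- A's token-mapping 'if x in Indirect then Indirect[x] else x' is dict.get(x, x)
theorem pv_map_getD :
    (fun x => if (PySem.Dict.get? IndirectChangeStyles x).isSome
              then (PySem.Dict.get? IndirectChangeStyles x).getD x else x)
    = (fun t => (PySem.Dict.get? IndirectChangeStyles t).getD t) := by
  funext x
  cases h : PySem.Dict.get? IndirectChangeStyles x <;> simp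

-- splitOn never returns the empty list (so A's dead fall-through branch is unreachable)
theorem pv_splitOn_go_ne_nil (sep : List Char) (fuel : Nat) (l cur : List Char)
    (acc : List (List Char)) : PySem.Chars.splitOn.go sep fuel l cur acc ≠ [] := by
  induction fuel generalizing l cur acc with
  | zero => simp [PySem.Chars.splitOn.go]
  | succ n ih =>
    cases l with
    | nil => simp [PySem.Chars.splitOn.go]
    | cons c rest =>
      rw [PySem.Chars.splitOn.go]
      split
      · exact ih _ _ _
      · exact ih _ _ _

theorem pv_tokens_ne_nil (style : String) :
    ((PySem.Str.split? style ",").getD []).map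
      (fun t => (PySem.Dict.get? IndirectChangeStyles t).getD t) ≠ [] := by
  simp only [PySem.Str.split?, PySem.Chars.split?, PySem.Chars.splitOn]
  simp only [show ((",".toList.isEmpty)) = false from rfl]
  simp only [Bool.false_eq_true, if_false, Option.map_some, Option.getD_some, ne_eq, List.map_eq_nil_iff]
  exact pv_splitOn_go_ne_nil _ _ _ _ _

-- ===== VERDICT (by name: the statement is the Claim_ definition above) =====
theorem taggedMaker_spec : Claim_equal_taggedMaker := by
  intro style content _dom _pre
  unfold Spec_taggedMaker taggedMaker taggedMaker_alt
  by_cases hs : style = ""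
  · simp [hs]
  · rw [if_neg hs, if_neg hs]
    simp only [pv_map_getD, pv_fold_partition, List.nil_append, pv_tmGo_eq]
    set tokens := ((PySem.Str.split? style ",").getD []).map
      (fun t => (PySem.Dict.get? IndirectChangeStyles t).getD t) with htok
    set lt := tokens.filter (fun t => !(PySem.Str.isIn ":" t)) with hlt
    set ht := tokens.filter (fun t => PySem.Str.isIn ":" t) with hht
    by_cases hl : lt = [] <;> by_cases hh : ht = []
    · -- both empty: impossible, tokens nonempty
      exfalso
      have hne := pv_tokens_ne_nil style
      rw [← htok] at hne
      rcases List.exists_mem_of_ne_nil _ hne with ⟨x, hx⟩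
      by_cases hcol : PySem.Str.isIn ":" x = true
      · exact absurd (hht ▸ List.mem_filter.mpr ⟨hx, hcol⟩) (by simp [hh])
      · exact absurd (hlt ▸ List.mem_filter.mpr ⟨hx, by simpa using eq_false_of_ne_true hcol⟩)
          (by simp [hl])
    · -- only style properties
      rw [if_neg (by simp [hl]), if_neg (by simp [hl]), if_pos hh, if_neg hh]
      simp only [hl, List.map_nil, List.reverse_nil]
      rw [show PySem.Str.join "" ([] : List String) = "" from rfl]
      by_cases ha : PySem.Str.isIn "align" (PySem.Str.join ";" ht ++ ";") = true
      · rw [if_pos ((pv_align_collapse _).mpr ha), if_pos ha]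
        rw [show ("<div style=\"" : String) = "<" ++ "div" ++ " style=\"" from rfl,
            show ("</div>\n" : String) = "</" ++ "div" ++ ">\n" from rfl]
        simp [String.append_assoc, String.append_empty, String.empty_append]
      · rw [if_neg (by rw [pv_align_collapse]; exact ha), if_neg ha]
        rw [show ("<span style=\"" : String) = "<" ++ "span" ++ " style=\"" from rfl,
            show ("</span>\n" : String) = "</" ++ "span" ++ ">\n" from rfl]
        simp [String.append_assoc, String.append_empty, String.empty_append]
    · -- only direct tags
      rw [if_neg (by simp [hh]), if_pos hl, if_pos hh]
    · -- both
      rw [if_pos ⟨hl, hh⟩, if_neg hh]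
      by_cases ha : PySem.Str.isIn "align" (PySem.Str.join ";" ht ++ ";") = true
      · rw [if_pos ((pv_align_collapse _).mpr ha), if_pos ha]
        rw [show ("<div style=\"" : String) = "<" ++ "div" ++ " style=\"" from rfl,
            show ("</div>\n" : String) = "</" ++ "div" ++ ">\n" from rfl]
        simp [String.append_assoc]
      · rw [if_neg (by rw [pv_align_collapse]; exact ha), if_neg ha]
        rw [show ("<span style=\"" : String) = "<" ++ "span" ++ " style=\"" from rfl,
            show ("</span>\n" : String) = "</" ++ "span" ++ ">\n" from rfl]
        simp [String.append_assoc]
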